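-- pv_equiv track=rewrite | github.com/mpettersson/PythonReview | questions/list_and_recursion/len_longest_nondecreasing_subsequence.py | len_longest_nondecreasing_subsequence
-- ===== SOURCE A (Python) =====
-- from bisect import bisect_right
--
-- def len_longest_nondecreasing_subsequence(l):
--     if isinstance(l, list):
--         tops = []                               # This emulates the tops of the piles in a Patience Sort.
--         for e in l:                             # For each value in the list:
--             if len(tops) == 0 or e >= tops[-1]:      # If no 'piles' yet, or current value is greater than top values:
--                 tops.append(e)                          # Make a new 'pile'.
--             else:                                   # Else
--                 tops[bisect_right(tops, e)] = e         # Binary search for the value to replace with the current value.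
--         return len(tops)                        # Return the number of 'piles'.
-- ===== SOURCE B (Python) =====
-- def len_longest_nondecreasing_subsequence(l):
--     if isinstance(l, list):
--         dp = []                      # (value, length of longest nondecreasing subsequence ending at it)
--         for e in l:
--             best = 0
--             for v, d in dp:
--                 if v <= e:
--                     best = max(best, d)
--             dp.append((e, best + 1))
--         res = 0
--         for _, d in dp:
--             res = max(res, d)
--         return res
-- ===== Notes on version B (the rewrite author's own statement) =====
-- stated objective: alternative
-- what changed: Replaces the patience-sort piles array with bisect_right replacement by the classic O(n^2) dynamic program that records, per element, the length of the longest nondecreasing subsequence ending there and returns the maximum.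
import Mathlib
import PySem

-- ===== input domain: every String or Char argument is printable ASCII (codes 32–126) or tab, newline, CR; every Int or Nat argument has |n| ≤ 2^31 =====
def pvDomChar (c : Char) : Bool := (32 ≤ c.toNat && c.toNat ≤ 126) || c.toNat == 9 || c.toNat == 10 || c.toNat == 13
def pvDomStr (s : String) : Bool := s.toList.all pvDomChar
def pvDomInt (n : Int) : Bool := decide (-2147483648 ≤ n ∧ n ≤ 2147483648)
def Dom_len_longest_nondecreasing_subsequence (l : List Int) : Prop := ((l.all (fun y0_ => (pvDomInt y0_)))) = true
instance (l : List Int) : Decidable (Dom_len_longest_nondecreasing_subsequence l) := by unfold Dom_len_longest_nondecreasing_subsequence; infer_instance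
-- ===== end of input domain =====

-- B replaces A's patience-sort piles array (with bisect_right replacement) by the classic
-- O(n^2) dynamic program over per-element subsequence lengths; alternative algorithm, not faster.


-- ===== PORT A =====
-- Python's bisect.bisect_right(a, x): while lo < hi: mid = (lo+hi)//2; if x < a[mid]: hi = mid else lo = mid+1
def bisectRightGo (a : List Int) (x : Int) (lo hi : Nat) : Nat :=
  if _h : lo < hi then
    -- mid = (lo + hi) // 2, inlined
    if x < a.getD ((lo + hi) / 2) 0 then bisectRightGo a x lo ((lo + hi) / 2)
    else bisectRightGo a x ((lo + hi) / 2 + 1) hi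
  else lo
termination_by hi - lo
decreasing_by all_goals omega

def bisectRight (a : List Int) (x : Int) : Nat := bisectRightGo a x 0 a.length

-- body of A's for-loop over l (tops[-1] is tops.getD (len-1) 0, guarded by the emptiness test)
def lndsStepA (tops : List Int) (e : Int) : List Int :=
  if tops.length = 0 ∨ tops.getD (tops.length - 1) 0 ≤ e then tops ++ [e]
  else tops.set (bisectRight tops e) e

def len_longest_nondecreasing_subsequence (l : List Int) : Int :=
  ((l.foldl lndsStepA []).length : Int)

-- ===== PORT B =====
-- inner loop of Source B: best = max dp-value among earlier elements ≤ e (0 if none)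
def lndsBest (dp : List (Int × Int)) (e : Int) : Int :=
  dp.foldl (fun best p => if p.1 ≤ e then max best p.2 else best) 0

-- body of B's for-loop: dp.append((e, best + 1))
def lndsStepB (dp : List (Int × Int)) (e : Int) : List (Int × Int) :=
  dp ++ [(e, lndsBest dp e + 1)]

def len_longest_nondecreasing_subsequence_alt (l : List Int) : Int :=
  (l.foldl lndsStepB []).foldl (fun res p => max res p.2) 0

-- ===== PRECONDITION & SPEC =====
def Spec_len_longest_nondecreasing_subsequence (l : List Int) (out : Int) : Prop := out = len_longest_nondecreasing_subsequence_alt l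
instance (l : List Int) (out : Int) : Decidable (Spec_len_longest_nondecreasing_subsequence l out) := by unfold Spec_len_longest_nondecreasing_subsequence; infer_instance

-- ===== CLAIM (what is proved, stated in full; the proofs are below) =====
def Claim_equal_len_longest_nondecreasing_subsequence : Prop := ∀ (l : List Int), Dom_len_longest_nondecreasing_subsequence l → Spec_len_longest_nondecreasing_subsequence l (len_longest_nondecreasing_subsequence l)

-- ===== LEMMAS AND PROOFS =====

-- maximum dp-value recorded so far (the quantity B's final loop computes)
def maxD (P : List (Int × Int)) : Int := P.foldl (fun res p => max res p.2) 0

-- Loop invariant tying A's piles array to B's dp list: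
-- tops.getD k 0 is the least value closing a nondecreasing subsequence of length k+1,
-- expressed as the ↔ below, and the number of piles equals the maximal dp-value.
def lndsInv (tops : List Int) (P : List (Int × Int)) : Prop :=
  (∀ k : Nat, k < tops.length → ∀ x : Int,
      (tops.getD k 0 ≤ x ↔ ∃ p ∈ P, p.1 ≤ x ∧ (k : Int) + 1 ≤ p.2))
  ∧ (tops.length : Int) = maxD P

-- generic fold-max facts
theorem foldl_max_ge_init (P : List (Int × Int)) (c : Int × Int → Prop) [DecidablePred c] (b : Int) :
    b ≤ P.foldl (fun best p => if c p then max best p.2 else best) b := by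
  induction P generalizing b with
  | nil => simp
  | cons q P ih =>
      simp only [List.foldl_cons]
      refine le_trans ?_ (ih _)
      split <;> simp

theorem foldl_max_ge_mem (P : List (Int × Int)) (c : Int × Int → Prop) [DecidablePred c] (b : Int)
    (p : Int × Int) (hp : p ∈ P) (hc : c p) :
    p.2 ≤ P.foldl (fun best p => if c p then max best p.2 else best) b := by
  induction hp generalizing b with
  | head as =>
      simp only [List.foldl_cons]
      refine le_trans ?_ (foldl_max_ge_init as c _)
      simp [hc]
  | tail q hp ih =>
      simp only [List.foldl_cons]
      exact ih _

theorem foldl_max_eq_init_or_mem (P : List (Int × Int)) (c : Int × Int → Prop) [DecidablePred c] (b : Int) :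
    P.foldl (fun best p => if c p then max best p.2 else best) b = b ∨
      ∃ p ∈ P, c p ∧ p.2 = P.foldl (fun best p => if c p then max best p.2 else best) b := by
  induction P generalizing b with
  | nil => simp
  | cons q P ih =>
      simp only [List.foldl_cons]
      by_cases hq : c q
      · simp only [if_pos hq]
        rcases ih (max b q.2) with h | ⟨p, hp, hc, he⟩
        · rcases max_choice b q.2 with hm | hm
          · exact Or.inl (h.trans hm)
          · exact Or.inr ⟨q, List.mem_cons_self, hq, by rw [h, hm]⟩
        · exact Or.inr ⟨p, List.mem_cons_of_mem _ hp, hc, he⟩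
      · simp only [if_neg hq]
        rcases ih b with h | ⟨p, hp, hc, he⟩
        · exact Or.inl h
        · exact Or.inr ⟨p, List.mem_cons_of_mem _ hp, hc, he⟩

theorem maxD_as_cond (P : List (Int × Int)) :
    maxD P = P.foldl (fun best p => if (fun _ : Int × Int => True) p then max best p.2 else best) 0 := by
  unfold maxD
  simp

theorem maxD_nonneg (P : List (Int × Int)) : 0 ≤ maxD P := by
  rw [maxD_as_cond]; exact foldl_max_ge_init P _ 0

theorem maxD_ge_mem (P : List (Int × Int)) (p : Int × Int) (hp : p ∈ P) : p.2 ≤ maxD P := by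
  rw [maxD_as_cond]; exact foldl_max_ge_mem P _ 0 p hp trivial

theorem maxD_append (P : List (Int × Int)) (q : Int × Int) :
    maxD (P ++ [q]) = max (maxD P) q.2 := by
  unfold maxD; simp

theorem lndsBest_nonneg (P : List (Int × Int)) (e : Int) : 0 ≤ lndsBest P e :=
  foldl_max_ge_init P _ 0

theorem lndsBest_ge (P : List (Int × Int)) (e : Int) (p : Int × Int) (hp : p ∈ P) (hc : p.1 ≤ e) :
    p.2 ≤ lndsBest P e :=
  foldl_max_ge_mem P _ 0 p hp hc

theorem lndsBest_attained (P : List (Int × Int)) (e : Int) :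
    lndsBest P e = 0 ∨ ∃ p ∈ P, p.1 ≤ e ∧ p.2 = lndsBest P e :=
  foldl_max_eq_init_or_mem P _ 0

theorem lndsBest_le_maxD (P : List (Int × Int)) (e : Int) : lndsBest P e ≤ maxD P := by
  rcases lndsBest_attained P e with h | ⟨p, hp, _, he⟩
  · rw [h]; exact maxD_nonneg P
  · rw [← he]; exact maxD_ge_mem P p hp

-- threshold characterisation: under the invariant, tops.getD k 0 ≤ e ↔ k < best
theorem inv_threshold (tops : List Int) (P : List (Int × Int)) (hinv : lndsInv tops P)
    (e : Int) (k : Nat) (hk : k < tops.length) :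
    tops.getD k 0 ≤ e ↔ (k : Int) < lndsBest P e := by
  constructor
  · intro h
    rcases (hinv.1 k hk e).mp h with ⟨p, hp, hpe, hkd⟩
    have := lndsBest_ge P e p hp hpe
    omega
  · intro h
    rcases lndsBest_attained P e with h0 | ⟨p, hp, hpe, he⟩
    · omega
    · exact (hinv.1 k hk e).mpr ⟨p, hp, hpe, by omega⟩

-- binary-search correctness against a monotone threshold
theorem bisectRightGo_spec (a : List Int) (x : Int) (m : Int)
    (H : ∀ k : Nat, k < a.length → (a.getD k 0 ≤ x ↔ (k : Int) < m)) :
    ∀ lo hi : Nat, lo ≤ hi → hi ≤ a.length → (lo : Int) ≤ m → m ≤ (hi : Int) →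
      (bisectRightGo a x lo hi : Int) = m := by
  intro lo hi
  induction lo, hi using bisectRightGo.induct a x with
  | case1 lo hi h hlt ih =>
      intro _ hhi hlom hmhi
      have hmida : (lo + hi) / 2 < a.length := by omega
      have := H ((lo + hi) / 2) hmida
      rw [bisectRightGo]
      simp only [dif_pos h, if_pos hlt]
      have hmmid : m ≤ (((lo + hi) / 2 : Nat) : Int) := by
        by_contra hc
        exact absurd (this.mpr (by omega)) (by omega)
      exact ih (by omega) (by omega) hlom hmmid
  | case2 lo hi h hlt ih =>
      intro _ hhi hlom hmhi
      have hmida : (lo + hi) / 2 < a.length := by omega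
      have hle : a.getD ((lo + hi) / 2) 0 ≤ x := by omega
      have : (((lo + hi) / 2 : Nat) : Int) < m := (H ((lo + hi) / 2) hmida).mp hle
      rw [bisectRightGo]
      simp only [dif_pos h, if_neg hlt]
      exact ih (by omega) hhi (by omega) hmhi
  | case3 lo hi h =>
      intro hle _ hlom hmhi
      have : lo = hi := by omega
      subst this
      rw [bisectRightGo]
      simp only [dif_neg h]
      omega

theorem bisectRight_spec (a : List Int) (x : Int) (m : Int)
    (hm0 : 0 ≤ m) (hml : m ≤ (a.length : Int))
    (H : ∀ k : Nat, k < a.length → (a.getD k 0 ≤ x ↔ (k : Int) < m)) :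
    (bisectRight a x : Int) = m :=
  bisectRightGo_spec a x m H 0 a.length (Nat.zero_le _) le_rfl hm0 hml

-- the invariant is preserved by one loop iteration
theorem inv_step (tops : List Int) (P : List (Int × Int)) (e : Int) (hinv : lndsInv tops P) :
    lndsInv (lndsStepA tops e) (lndsStepB P e) := by
  set m := lndsBest P e with hm
  have hm0 : 0 ≤ m := lndsBest_nonneg P e
  have hmlen : m ≤ (tops.length : Int) := by
    rw [hinv.2]; exact lndsBest_le_maxD P e
  have hthr := inv_threshold tops P hinv e
  unfold lndsStepA lndsStepB
  rw [← hm]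
  by_cases hcond : tops.length = 0 ∨ tops.getD (tops.length - 1) 0 ≤ e
  · -- append branch: m = tops.length
    have hmeq : m = (tops.length : Int) := by
      rcases hcond with h0 | hlast
      · omega
      · rcases Nat.eq_zero_or_pos tops.length with h0 | hpos
        · omega
        · have := (hthr (tops.length - 1) (by omega)).mp hlast
          omega
    rw [if_pos hcond]
    constructor
    · intro k hk x
      rw [List.length_append, List.length_singleton] at hk
      rcases Nat.lt_or_ge k tops.length with hklt | hkge
      · rw [List.getD_append _ _ _ _ hklt]
        constructor
        · intro h
          rcases (hinv.1 k hklt x).mp h with ⟨p, hp, hpe, hkd⟩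
          exact ⟨p, List.mem_append_left _ hp, hpe, hkd⟩
        · rintro ⟨p, hp, hpe, hkd⟩
          rcases List.mem_append.mp hp with hp | hp
          · exact (hinv.1 k hklt x).mpr ⟨p, hp, hpe, hkd⟩
          · simp only [List.mem_singleton] at hp
            subst hp
            simp only at hpe hkd
            have hke : tops.getD k 0 ≤ e := (hthr k hklt).mpr (by omega)
            exact le_trans hke hpe
      · have hkeq : k = tops.length := by omega
        subst hkeq
        rw [List.getD_append_right _ _ _ _ (le_refl _)]
        simp only [Nat.sub_self, List.getD_cons_zero]
        constructor
        · intro h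
          exact ⟨(e, m + 1), List.mem_append_right _ (List.mem_singleton_self _), h, by omega⟩
        · rintro ⟨p, hp, hpe, hkd⟩
          rcases List.mem_append.mp hp with hp | hp
          · have := maxD_ge_mem P p hp
            rw [← hinv.2] at this
            omega
          · simp only [List.mem_singleton] at hp
            subst hp
            exact hpe
    · rw [List.length_append, List.length_singleton, maxD_append, ← hinv.2]
      push_cast
      omega
  · -- replace branch: m < tops.length, index bisectRight tops e = m
    rw [if_neg hcond]
    rw [not_or] at hcond
    obtain ⟨hne, hlast⟩ := hcond
    have hpos : 0 < tops.length := Nat.pos_of_ne_zero hne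
    have hmlt : m < (tops.length : Int) := by
      have := hthr (tops.length - 1) (by omega)
      rcases Nat.lt_or_ge ((tops.length - 1 : Nat)) tops.length with _ | _
      · by_contra hc
        have hmeq : ((tops.length - 1 : Nat) : Int) < m := by omega
        exact absurd (this.mpr hmeq) (by omega)
      · omega
    have hbis : bisectRight tops e = m.toNat := by
      have := bisectRight_spec tops e m hm0 (le_of_lt hmlt) (fun k hk => hthr k hk)
      omega
    rw [hbis]
    have hjlt : m.toNat < tops.length := by omega
    have hsetlen : (tops.set m.toNat e).length = tops.length := List.length_set
    constructor
    · intro k hk x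
      rw [hsetlen] at hk
      by_cases hkj : k = m.toNat
      · subst hkj
        rw [List.getD_eq_getElem?_getD, List.getElem?_set_self (by omega)]
        simp only [Option.getD_some]
        constructor
        · intro h
          exact ⟨(e, m + 1), List.mem_append_right _ (List.mem_singleton_self _), h, by push_cast; omega⟩
        · rintro ⟨p, hp, hpe, hkd⟩
          rcases List.mem_append.mp hp with hp | hp
          · -- old pair with p.2 ≥ m+1: then tops[m] ≤ p.1 ≤ x, and e < tops[m]
            have htme : ¬ tops.getD m.toNat 0 ≤ e := by
              rw [hthr m.toNat hjlt]; omega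
            have htmp : tops.getD m.toNat 0 ≤ p.1 :=
              (hinv.1 m.toNat hjlt p.1).mpr ⟨p, hp, le_refl _, by omega⟩
            omega
          · simp only [List.mem_singleton] at hp
            subst hp
            exact hpe
      · rw [List.getD_eq_getElem?_getD, List.getElem?_set_ne (by omega), ← List.getD_eq_getElem?_getD]
        constructor
        · intro h
          rcases (hinv.1 k hk x).mp h with ⟨p, hp, hpe, hkd⟩
          exact ⟨p, List.mem_append_left _ hp, hpe, hkd⟩
        · rintro ⟨p, hp, hpe, hkd⟩
          rcases List.mem_append.mp hp with hp | hp
          · exact (hinv.1 k hk x).mpr ⟨p, hp, hpe, hkd⟩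
          · simp only [List.mem_singleton] at hp
            subst hp
            simp only at hpe hkd
            have hkm : (k : Int) < m := by omega
            have : tops.getD k 0 ≤ e := (hthr k hk).mpr hkm
            omega
    · rw [hsetlen, maxD_append, ← hinv.2]
      omega

theorem inv_fold (l : List Int) :
    ∀ (tops : List Int) (P : List (Int × Int)), lndsInv tops P →
      lndsInv (l.foldl lndsStepA tops) (l.foldl lndsStepB P) := by
  induction l with
  | nil => intro tops P h; exact h
  | cons e l ih =>
      intro tops P h
      simp only [List.foldl_cons]
      exact ih _ _ (inv_step tops P e h)

theorem lndsInv_nil : lndsInv [] [] := by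
  constructor
  · intro k hk; simp at hk
  · rfl

-- ===== VERDICT (by name: the statement is the Claim_ definition above) =====
theorem len_longest_nondecreasing_subsequence_spec : Claim_equal_len_longest_nondecreasing_subsequence := by
  intro l _
  unfold Spec_len_longest_nondecreasing_subsequence
  unfold len_longest_nondecreasing_subsequence len_longest_nondecreasing_subsequence_alt
  exact (inv_fold l [] [] lndsInv_nil).2
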